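-- pv_equiv track=rewrite | github.com/TifMoe/partisan-tweets | src/features/generate_markov_dict.py | build_corpus_dict
-- ===== SOURCE A (Python) =====
-- from collections import defaultdict
--
-- def build_corpus_dict(corpus):
--     m_dict = defaultdict(list)
--     for sen in corpus:
--         for i, word in enumerate(sen.split()):
--             if i < len(sen.split())-1:
--                 m_dict[word].append(sen.split()[i + 1])
--             else:
--                 pass
--     return m_dict
-- ===== SOURCE B (Python) =====
-- def build_corpus_dict(corpus):
--     # Stage 1: flatten the corpus into one list of adjacent (word, next) pairs.
--     pairs = []
--     for sen in corpus:
--         words = sen.split()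
--         pairs.extend(zip(words, words[1:]))
--     # Stage 2: group-by key — distinct keys in first-occurrence order, each
--     # mapped to all its successors gathered by a filter over the pair list.
--     keys = list(dict.fromkeys(w for w, _ in pairs))
--     return {w: [nxt for p, nxt in pairs if p == w] for w in keys}
-- ===== Notes on version B (the rewrite author's own statement) =====
-- stated objective: alternative
-- what changed: B is a staged group-by: it first flattens the corpus into one list of adjacent (word,next) pairs, then computes the distinct keys in first-occurrence order and builds each value by filtering the pair list, instead of A's incremental defaultdict appended to per word inside an index-guarded enumerate loop that re-splits the sentence at every step.
import Mathlib
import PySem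

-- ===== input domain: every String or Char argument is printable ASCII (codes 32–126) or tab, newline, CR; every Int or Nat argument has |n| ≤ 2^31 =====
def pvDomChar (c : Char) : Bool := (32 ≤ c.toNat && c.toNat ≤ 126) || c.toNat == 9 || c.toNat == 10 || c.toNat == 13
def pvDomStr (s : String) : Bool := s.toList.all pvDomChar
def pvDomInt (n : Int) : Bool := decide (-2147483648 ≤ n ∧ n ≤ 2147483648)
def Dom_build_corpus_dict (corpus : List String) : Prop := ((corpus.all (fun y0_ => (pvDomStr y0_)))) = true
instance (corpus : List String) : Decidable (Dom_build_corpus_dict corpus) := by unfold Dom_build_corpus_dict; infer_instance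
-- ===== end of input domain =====

-- B is a staged group-by (flat pair list, then distinct keys, then per-key filter) instead of
-- A's incremental dict built inside an index-guarded enumerate loop; objective: alternative.

-- ===== PORT A =====
-- sen.split()[i + 1] is guarded by i < len(sen.split())-1, so the index is always
-- in range; pyGetD with default "" is exact under that guard.
def build_corpus_dict (corpus : List String) : List (String × List String) :=
  (corpus.foldl (fun m_dict sen =>
      (PySem.List.enumerate (PySem.Str.split₀ sen) 0).foldl (fun m_dict p =>
        if p.1 < ((PySem.Str.split₀ sen).length : Int) - 1 then
          m_dict.modify p.2 [] (· ++ [PySem.List.pyGetD (PySem.Str.split₀ sen) (p.1 + 1) ""])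
        else m_dict) m_dict)
    PySem.Dict.empty).items

-- ===== PORT B =====
-- words[1:] is the tail of the split; zip(words, words[1:]) = words.zip words.tail;
-- list(dict.fromkeys(…)) = PySem.List.dedup (first occurrences, in order).
def build_corpus_dict_alt (corpus : List String) : List (String × List String) :=
  let pairs := corpus.foldl (fun acc sen =>
      let words := PySem.Str.split₀ sen
      acc ++ words.zip words.tail) []
  let keys := PySem.List.dedup (pairs.map Prod.fst)
  keys.map (fun w => (w, (pairs.filter (fun p => p.1 == w)).map Prod.snd))

-- ===== PRECONDITION & SPEC =====
def Spec_build_corpus_dict (corpus : List String) (out : List (String × List String)) : Prop := out = build_corpus_dict_alt corpus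
instance (corpus : List String) (out : List (String × List String)) : Decidable (Spec_build_corpus_dict corpus out) := by unfold Spec_build_corpus_dict; infer_instance

-- ===== CLAIM (what is proved, stated in full; the proofs are below) =====
def Claim_equal_build_corpus_dict : Prop := ∀ (corpus : List String), Dom_build_corpus_dict corpus → Spec_build_corpus_dict corpus (build_corpus_dict corpus)

-- ===== LEMMAS AND PROOFS =====

-- A's inner loop over the enumerated suffix of `full` starting at index s equals
-- the pair-fold over that suffix's adjacent pairs.
theorem pv_inner_eq (ws : List String) : ∀ (full : List String) (s : Nat)
    (d : PySem.Dict String (List String)),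
    s + ws.length = full.length → full.drop s = ws →
    (PySem.List.enumerate ws (s : Int)).foldl (fun m p =>
        if p.1 < (full.length : Int) - 1 then
          m.modify p.2 [] (· ++ [PySem.List.pyGetD full (p.1 + 1) ""])
        else m) d
      = (ws.zip ws.tail).foldl (fun m p => m.modify p.1 [] (· ++ [p.2])) d := by
  induction ws with
  | nil => intro full s d _ _; simp [PySem.List.enumerate_nil]
  | cons w rest ih =>
    intro full s d hlen hdrop
    rw [PySem.List.enumerate_cons, List.foldl_cons]
    cases rest with
    | nil =>
      have hguard : ¬ ((s : Int) < (full.length : Int) - 1) := by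
        simp at hlen; omega
      rw [if_neg hguard]
      simp [PySem.List.enumerate_nil]
    | cons r rest' =>
      have hguard : (s : Int) < (full.length : Int) - 1 := by
        simp at hlen; omega
      rw [if_pos hguard]
      have hget : PySem.List.pyGetD full ((s : Int) + 1) "" = r := by
        have hcast : (s : Int) + 1 = ((s + 1 : Nat) : Int) := by push_cast; ring
        rw [hcast, PySem.List.pyGetD_natCast]
        have h1 : full[s + 1]? = (full.drop s)[1]? := by
          rw [List.getElem?_drop]
        rw [hdrop] at h1
        simp [List.getD, h1]
      rw [hget]
      have hdrop' : full.drop (s + 1) = r :: rest' := by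
        have h2 := congrArg (List.drop 1) hdrop
        rw [List.drop_drop] at h2
        simpa [Nat.add_comm] using h2
      have hlen' : (s + 1) + (r :: rest').length = full.length := by
        simp at hlen ⊢; omega
      have hcast : (s : Int) + 1 = ((s + 1 : Nat) : Int) := by push_cast; ring
      rw [hcast, ih full (s + 1) _ hlen' hdrop']
      rfl

-- A's whole loop nest is the modify-fold over the flat pair list B builds.
theorem pv_flat_eq (corpus : List String) : ∀ (acc : List (String × String))
    (d : PySem.Dict String (List String)),
    (acc.foldl (fun m p => m.modify p.1 [] (· ++ [p.2])) d |>
      fun d0 => corpus.foldl (fun m_dict sen =>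
        (PySem.List.enumerate (PySem.Str.split₀ sen) 0).foldl (fun m_dict p =>
          if p.1 < ((PySem.Str.split₀ sen).length : Int) - 1 then
            m_dict.modify p.2 [] (· ++ [PySem.List.pyGetD (PySem.Str.split₀ sen) (p.1 + 1) ""])
          else m_dict) m_dict) d0)
    = (corpus.foldl (fun acc sen =>
        acc ++ (PySem.Str.split₀ sen).zip (PySem.Str.split₀ sen).tail) acc).foldl
        (fun m p => m.modify p.1 [] (· ++ [p.2])) d := by
  induction corpus with
  | nil => intro acc d; rfl
  | cons sen rest ih =>
    intro acc d
    simp only [List.foldl_cons]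
    have hsen := pv_inner_eq (PySem.Str.split₀ sen) (PySem.Str.split₀ sen) 0
      (acc.foldl (fun m p => m.modify p.1 [] (· ++ [p.2])) d) (by simp) (by simp)
    simp only [Nat.cast_zero] at hsen
    rw [hsen, ← List.foldl_append]
    exact ih (acc ++ (PySem.Str.split₀ sen).zip (PySem.Str.split₀ sen).tail) d

-- items of the modify-fold dict = B's staged group-by over the pair list.
theorem pv_items_eq (ps : List (String × String)) :
    (ps.foldl (fun m p => m.modify p.1 [] (· ++ [p.2])) PySem.Dict.empty).items
    = (PySem.List.dedup (ps.map Prod.fst)).map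
        (fun w => (w, (ps.filter (fun p => p.1 == w)).map Prod.snd)) := by
  set D := ps.foldl (fun m p => m.modify p.1 [] (· ++ [p.2])) PySem.Dict.empty with hD
  have hnd : D.keys.Nodup := by
    rw [hD]
    exact PySem.Dict.nodup_keys_foldl_modify_key ps Prod.fst [] (fun d p => (· ++ [p.2]))
      PySem.Dict.empty (by simp [PySem.Dict.keys_empty])
  have hkeys : D.keys = PySem.List.dedup (ps.map Prod.fst) := by
    rw [hD, PySem.Dict.keys_foldl_modify_key]
    simp [PySem.Dict.keys_empty, PySem.Set.update_nil_left, PySem.List.dedup_eq_ofList]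
  have hitems := PySem.Dict.items_eq_map_keys D hnd ([] : List String)
  rw [hitems, hkeys]
  apply List.map_congr_left
  intro w _
  have hget : D.getD w [] = (ps.filter (fun p => p.1 == w)).map Prod.snd := by
    rw [hD, PySem.Dict.getD_foldl_modify_append]
    simp [PySem.Dict.getD_empty]
  rw [hget]

-- ===== VERDICT (by name: the statement is the Claim_ definition above) =====
theorem build_corpus_dict_spec : Claim_equal_build_corpus_dict := by
  intro corpus _
  unfold Spec_build_corpus_dict build_corpus_dict build_corpus_dict_alt
  have h := pv_flat_eq corpus [] PySem.Dict.empty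
  simp only [List.foldl_nil] at h
  rw [h, pv_items_eq]
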